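-- pv_equiv track=rewrite | github.com/yanny2five/paperfile-web | modules/bibtex_import.py | _extract_year_digits
-- ===== SOURCE A (Python) =====
-- from typing import Any, Dict, List, Tuple
--
-- def _extract_year_digits(s: Any) -> str:
--     raw = str(s or "").strip()
--     if not raw:
--         return ""
--     digits = "".join(ch for ch in raw if ch.isdigit())
--     if len(digits) >= 4:
--         return digits[-4:]
--     return digits
-- ===== SOURCE B (Python) =====
-- def _extract_year_digits(s):
--     raw = str(s or "").strip()
--     if not raw:
--         return ""
--     picked = []
--     for ch in reversed(raw):
--         if ch.isdigit():
--             picked.append(ch)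
--             if len(picked) == 4:
--                 break
--     picked.reverse()
--     return "".join(picked)
-- ===== Notes on version B (the rewrite author's own statement) =====
-- stated objective: alternative
-- what changed: B scans the stripped string backwards collecting digit characters and stops as soon as 4 are found, instead of building the full digit string and slicing its last 4 characters.
import Mathlib
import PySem

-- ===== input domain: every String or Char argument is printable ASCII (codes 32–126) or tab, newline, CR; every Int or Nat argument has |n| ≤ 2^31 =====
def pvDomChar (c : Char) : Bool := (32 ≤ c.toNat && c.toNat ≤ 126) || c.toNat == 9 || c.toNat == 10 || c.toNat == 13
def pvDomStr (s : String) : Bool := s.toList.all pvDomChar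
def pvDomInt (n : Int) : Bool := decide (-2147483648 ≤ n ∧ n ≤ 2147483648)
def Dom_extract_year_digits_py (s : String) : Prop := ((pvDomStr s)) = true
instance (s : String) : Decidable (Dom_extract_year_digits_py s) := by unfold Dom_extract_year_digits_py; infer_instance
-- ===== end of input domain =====

-- B scans the stripped string backwards, stopping after 4 digits, instead of
-- building the whole digit string and slicing its last 4; same result, alternative decomposition.

-- ===== PORT A =====
def extract_year_digits_py (s : String) : String :=
  let raw := PySem.Str.strip (if s = "" then "" else s)   -- str(s or "").strip()
  if raw = "" then ""
  else
    let digits := raw.toList.filter PySem.Chars.isdigit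
    if digits.length ≥ 4 then String.ofList (PySem.List.slice digits (some (-4)) none)
    else String.ofList digits

-- ===== PORT B =====
-- for ch in reversed(raw): append digit, break when 4 collected
def pvPickRev : List Char → List Char → List Char
  | [], acc => acc
  | c :: rest, acc =>
    if PySem.Chars.isdigit c then
      let acc' := acc ++ [c]
      if acc'.length == 4 then acc' else pvPickRev rest acc'
    else pvPickRev rest acc

def extract_year_digits_py_alt (s : String) : String :=
  let raw := PySem.Str.strip (if s = "" then "" else s)
  if raw = "" then ""
  else String.ofList (pvPickRev raw.toList.reverse []).reverse

-- ===== PRECONDITION & SPEC =====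
def Spec_extract_year_digits_py (s : String) (out : String) : Prop := out = extract_year_digits_py_alt s
instance (s : String) (out : String) : Decidable (Spec_extract_year_digits_py s out) := by unfold Spec_extract_year_digits_py; infer_instance

-- ===== CLAIM (what is proved, stated in full; the proofs are below) =====
def Claim_equal_extract_year_digits_py : Prop := ∀ (s : String), Dom_extract_year_digits_py s → Spec_extract_year_digits_py s (extract_year_digits_py s)

-- ===== LEMMAS AND PROOFS =====

-- the backward scan collects the first (4 - acc.length) digits of l after acc
theorem pvPickRev_spec (l : List Char) : ∀ acc : List Char, acc.length ≤ 3 →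
    pvPickRev l acc = acc ++ (l.filter PySem.Chars.isdigit).take (4 - acc.length) := by
  induction l with
  | nil => intro acc _; simp [pvPickRev]
  | cons c rest ih =>
    intro acc hacc
    by_cases hd : PySem.Chars.isdigit c
    · by_cases h4 : acc.length + 1 = 4
      · simp [pvPickRev, hd, h4]
        have : 4 - acc.length = 1 := by omega
        simp [this]
      · have hlen : (acc ++ [c]).length ≤ 3 := by simp; omega
        have hih := ih (acc ++ [c]) hlen
        simp only [pvPickRev, hd, if_true, List.length_append, List.length_cons,
          List.length_nil, Nat.zero_add, beq_iff_eq, h4, if_false, hih,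
          List.filter_cons_of_pos, List.append_assoc, List.cons_append, List.nil_append]
        rw [show 4 - acc.length = (4 - (acc.length + 1)) + 1 by omega, List.take_succ_cons]
    · simp [pvPickRev, hd, ih acc hacc]

theorem extract_core (d : List Char) :
    (if d.length ≥ 4 then String.ofList (PySem.List.slice d (some (-4)) none) else String.ofList d)
      = String.ofList ((d.reverse.take 4).reverse) := by
  rw [List.take_reverse, List.reverse_reverse]
  by_cases h : d.length ≥ 4
  · simp only [h, if_pos]
    rw [PySem.List.slice_from_neg_ofNat d 4 (by omega)]
  · simp only [h, if_neg, not_false_iff]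
    have : d.length - 4 = 0 := by omega
    simp [this]

-- ===== VERDICT (by name: the statement is the Claim_ definition above) =====
theorem extract_year_digits_py_spec : Claim_equal_extract_year_digits_py := by
  intro s _
  unfold Spec_extract_year_digits_py extract_year_digits_py extract_year_digits_py_alt
  set raw := PySem.Str.strip (if s = "" then "" else s) with hraw
  by_cases h : raw = ""
  · simp [h]
  · simp only [h, if_neg, not_false_iff]
    rw [pvPickRev_spec _ [] (by simp)]
    simp only [List.nil_append, List.length_nil, Nat.sub_zero]
    rw [List.filter_reverse]
    exact extract_core _
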